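-- pv_equiv track=rewrite | github.com/ronkatz29/Boogle_game_GUI | ex12_utils.py | find_neighbors_cord
-- ===== SOURCE A (Python) =====
-- import itertools
--
-- def _check_cord_in_board(cord, board):
--     """
--     :param board: list of lists each with strings of len 1 or 2
--     :param cord: Tuple[int,int]
--     :return: True is cord is legal False either
--     """
--     board_width = len(board[0])
--     board_len = len(board)
--     if (cord[0] < 0) or (cord[0] > (board_len - 1)):
--         return False
--     if (cord[1] < 0) or (cord[1] > (board_width - 1)):
--         return False
--     return True
--
-- def find_neighbors_cord(cord, visited_cords, board, remain_word):
--     """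
--     :param visited_cords:List[Tuple[int,int]] list of cords we already visited
--     :param cord: Tuple[int,int]
--     :return: List[Tuple[int,int]]
--     """
--     # we found the word , just send another recursion with random cord
--     if remain_word == "":
--         return [(-1, -1)]
--     neighbors_list = list()
--     for x_move, y_move in itertools.product(range(-1, 2), repeat=2):
--         neighbor_cord = cord[0] + x_move, cord[1] + y_move
--         if neighbor_cord not in visited_cords and _check_cord_in_board(
--                 neighbor_cord, board) and neighbor_cord != cord:
--             neighbors_list.append(neighbor_cord)
--     return neighbors_list
-- ===== SOURCE B (Python) =====
-- def find_neighbors_cord(cord, visited_cords, board, remain_word):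
--     """
--     :param visited_cords:List[Tuple[int,int]] list of cords we already visited
--     :param cord: Tuple[int,int]
--     :return: List[Tuple[int,int]]
--     """
--     if remain_word == "":
--         return [(-1, -1)]
--     width = len(board[0])
--     return [(r, c)
--             for r in range(len(board))
--             for c in range(width)
--             if max(abs(r - cord[0]), abs(c - cord[1])) == 1
--             and (r, c) not in visited_cords]
-- ===== Notes on version B (the rewrite author's own statement) =====
-- stated objective: alternative
-- what changed: B scans the whole board grid once and keeps the cells at Chebyshev distance exactly 1 from cord that are not visited (a global distance-filter comprehension), instead of A's local generation of the 3x3 offset candidates with a separate bounds predicate.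
-- outside the precondition, e.g. on find_neighbors_cord((0, 0), [], [], 'x'): A raises IndexError, B raises IndexError
import Mathlib
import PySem

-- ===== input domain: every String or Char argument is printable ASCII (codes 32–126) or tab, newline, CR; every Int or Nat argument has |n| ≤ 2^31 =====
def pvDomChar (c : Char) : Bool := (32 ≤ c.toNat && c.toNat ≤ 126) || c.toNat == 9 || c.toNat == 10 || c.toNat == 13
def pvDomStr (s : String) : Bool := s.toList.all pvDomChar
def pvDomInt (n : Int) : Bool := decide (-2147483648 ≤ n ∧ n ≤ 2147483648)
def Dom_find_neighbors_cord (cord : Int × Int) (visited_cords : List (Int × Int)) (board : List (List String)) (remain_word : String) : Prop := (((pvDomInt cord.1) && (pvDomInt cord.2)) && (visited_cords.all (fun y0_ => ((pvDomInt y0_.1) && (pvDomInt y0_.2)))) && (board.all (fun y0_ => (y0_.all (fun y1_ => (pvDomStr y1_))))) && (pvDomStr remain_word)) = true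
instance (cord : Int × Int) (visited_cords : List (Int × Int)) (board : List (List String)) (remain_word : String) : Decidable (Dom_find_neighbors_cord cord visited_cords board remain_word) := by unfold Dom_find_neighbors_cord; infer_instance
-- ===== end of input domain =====

-- B replaces A's local 3x3 candidate generation (offsets + bounds predicate) by a single whole-board scan keeping the cells at Chebyshev distance exactly 1 from cord (alternative algorithm, not claimed faster).


-- ===== PORT A =====
-- _check_cord_in_board; Python's board[0] raises IndexError on an empty board — that input is excluded by Pre_, the port reads headD there
def pv_check_cord_in_board (cord : Int × Int) (board : List (List String)) : Bool :=
  let board_width : Int := (board.headD []).length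
  let board_len : Int := board.length
  if cord.1 < 0 ∨ cord.1 > board_len - 1 then false
  else if cord.2 < 0 ∨ cord.2 > board_width - 1 then false
  else true

-- itertools.product(range(-1, 2), repeat=2) is the literal 9-element list of moves
def find_neighbors_cord (cord : Int × Int) (visited_cords : List (Int × Int)) (board : List (List String)) (remain_word : String) : List (Int × Int) :=
  if remain_word = "" then [(-1, -1)]
  else
    (([(-1,-1),(-1,0),(-1,1),(0,-1),(0,0),(0,1),(1,-1),(1,0),(1,1)] : List (Int × Int)).foldl
      (fun neighbors_list mv =>
        let neighbor_cord : Int × Int := (cord.1 + mv.1, cord.2 + mv.2)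
        if neighbor_cord ∉ visited_cords ∧ pv_check_cord_in_board neighbor_cord board = true ∧ neighbor_cord ≠ cord
        then neighbors_list ++ [neighbor_cord] else neighbors_list) [])

-- ===== PORT B =====
-- len(board[0]) raises IndexError on an empty board in Python (excluded by Pre_); the port reads headD there.
-- The comprehension over the whole grid is a nested flatMap; max(abs(..), abs(..)) == 1 is the Chebyshev-distance test.
def find_neighbors_cord_alt (cord : Int × Int) (visited_cords : List (Int × Int)) (board : List (List String)) (remain_word : String) : List (Int × Int) :=
  if remain_word = "" then [(-1, -1)]
  else
    let width : Int := (board.headD []).length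
    (PySem.List.pyRange 0 board.length 1).flatMap (fun r =>
      (PySem.List.pyRange 0 width 1).flatMap (fun c =>
        if max (r - cord.1).natAbs (c - cord.2).natAbs = 1 ∧ (r, c) ∉ visited_cords
        then [(r, c)] else []))

-- ===== PRECONDITION & SPEC =====
-- Pre_ excludes exactly the inputs where Python A raises IndexError (board == [] with remain_word nonempty, via board[0]); B raises there too.
def Pre_find_neighbors_cord (cord : Int × Int) (visited_cords : List (Int × Int)) (board : List (List String)) (remain_word : String) : Prop :=
  remain_word = "" ∨ board ≠ []
instance (cord : Int × Int) (visited_cords : List (Int × Int)) (board : List (List String)) (remain_word : String) : Decidable (Pre_find_neighbors_cord cord visited_cords board remain_word) := by unfold Pre_find_neighbors_cord; infer_instance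

def pvWitness_find_neighbors_cord : (Int × Int) × (List (Int × Int)) × List (List String) × String :=
  ((1, 1), [(0, 0)], [["a", "b"], ["c", "d"]], "ab")

def Spec_find_neighbors_cord (cord : Int × Int) (visited_cords : List (Int × Int)) (board : List (List String)) (remain_word : String) (out : List (Int × Int)) : Prop := out = find_neighbors_cord_alt cord visited_cords board remain_word
instance (cord : Int × Int) (visited_cords : List (Int × Int)) (board : List (List String)) (remain_word : String) (out : List (Int × Int)) : Decidable (Spec_find_neighbors_cord cord visited_cords board remain_word out) := by unfold Spec_find_neighbors_cord; infer_instance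

-- ===== CLAIM (what is proved, stated in full; the proofs are below) =====
def Claim_equal_find_neighbors_cord : Prop := ∀ (cord : Int × Int) (visited_cords : List (Int × Int)) (board : List (List String)) (remain_word : String), Dom_find_neighbors_cord cord visited_cords board remain_word → Pre_find_neighbors_cord cord visited_cords board remain_word → Spec_find_neighbors_cord cord visited_cords board remain_word (find_neighbors_cord cord visited_cords board remain_word)

-- ===== LEMMAS AND PROOFS =====

-- A's bounds predicate, as four inequalities
lemma check_iff (p : Int × Int) (board : List (List String)) :
    pv_check_cord_in_board p board = true ↔
      (0 ≤ p.1 ∧ p.1 < (board.length : Int) ∧ 0 ≤ p.2 ∧ p.2 < ((board.headD []).length : Int)) := by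
  simp only [pv_check_cord_in_board]
  split_ifs with h1 h2 <;> simp_all [List.headD_eq_head?_getD] <;> omega

-- A's conditional-append loop as a flatMap
lemma foldl_app_ite {α β : Type} (l : List α) (P : α → Prop) [DecidablePred P] (f : α → β) (acc : List β) :
    l.foldl (fun a x => if P x then a ++ [f x] else a) acc = acc ++ l.flatMap (fun x => if P x then [f x] else []) := by
  induction l generalizing acc with
  | nil => simp
  | cons y ys ih => simp only [List.foldl_cons, List.flatMap_cons, ih]; split <;> simp

lemma flatMap_ite_singleton {α β : Type} (c : Prop) [Decidable c] (v : α) (g : α → List β) :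
    (if c then [v] else []).flatMap g = if c then g v else [] := by split <;> simp

lemma ite_append_distrib {β : Type} (c : Prop) [Decidable c] (u v : List β) :
    (if c then u ++ v else ([] : List β)) = (if c then u else []) ++ (if c then v else []) := by
  split <;> simp

-- dropping elements on which the body is empty
lemma flatMap_eq_flatMap_filter {β : Type} (L : List Int) (P : Int → Prop) [DecidablePred P]
    (g : Int → List β) (hg : ∀ r ∈ L, ¬ P r → g r = []) :
    L.flatMap g = (L.filter (fun r => decide (P r))).flatMap g := by
  induction L with
  | nil => rfl
  | cons x xs ih =>
    by_cases hx : P x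
    · simp [List.filter_cons, hx, List.flatMap_cons,
        ih (fun r hr => hg r (List.mem_cons_of_mem _ hr))]
    · simp [hx, List.flatMap_cons, hg x (List.mem_cons_self) hx,
        ih (fun r hr => hg r (List.mem_cons_of_mem _ hr))]

-- filtering the full range by |r - a| ≤ 1 is exactly the clamped window range
lemma filter_pyRange_window (H a : Int) :
    (PySem.List.pyRange 0 H 1).filter (fun r => decide (a - 1 ≤ r ∧ r ≤ a + 1)) =
      PySem.List.pyRange (max 0 (a - 1)) (min H (a + 2)) 1 := by
  have hperm : ((PySem.List.pyRange 0 H 1).filter (fun r => decide (a - 1 ≤ r ∧ r ≤ a + 1))).Perm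
      (PySem.List.pyRange (max 0 (a - 1)) (min H (a + 2)) 1) := by
    refine (List.perm_ext_iff_of_nodup ?_ ?_).2 ?_
    · exact (PySem.List.nodup_pyRange_one 0 H).filter _
    · exact PySem.List.nodup_pyRange_one _ _
    · intro x
      simp only [List.mem_filter, PySem.List.mem_pyRange_one, decide_eq_true_eq]
      omega
  exact hperm.eq_of_pairwise'
    (((PySem.List.pairwise_lt_pyRange_one 0 H).filter _).imp le_of_lt)
    ((PySem.List.pairwise_lt_pyRange_one _ _).imp le_of_lt)

-- the clamped window range is the in-bounds part of the three candidates a-1, a, a+1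
lemma range3 (a H : Int) :
    PySem.List.pyRange (max 0 (a - 1)) (min H (a + 2)) 1 =
      (if 0 ≤ a - 1 ∧ a - 1 < H then [a - 1] else []) ++
      (if 0 ≤ a ∧ a < H then [a] else []) ++
      (if 0 ≤ a + 1 ∧ a + 1 < H then [a + 1] else []) := by
  by_cases h1 : 0 ≤ a - 1 ∧ a - 1 < H <;>
  by_cases h2 : 0 ≤ a ∧ a < H <;>
  by_cases h3 : 0 ≤ a + 1 ∧ a + 1 < H <;>
  simp only [h1, h2, h3, if_false, List.append_nil, List.nil_append] <;>
  rw [PySem.List.pyRange_one] <;>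
  first
  | exact absurd h3 (by omega)
  | exact absurd h1 (by omega)
  | (have hn : (min H (a + 2) - max 0 (a - 1)).toNat = 3 := by omega
     rw [hn]; simp [List.range_succ]; omega)
  | (have hn : (min H (a + 2) - max 0 (a - 1)).toNat = 2 := by omega
     rw [hn]; simp [List.range_succ]; omega)
  | (have hn : (min H (a + 2) - max 0 (a - 1)).toNat = 1 := by omega
     rw [hn]; simp [List.range_succ]; omega)
  | (have hn : (min H (a + 2) - max 0 (a - 1)).toNat = 0 := by omega
     rw [hn]; simp)

-- combined: a flatMap over the full range whose body vanishes outside |r - a| ≤ 1 is three guarded terms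
lemma flatMap_range_window {β : Type} (H a : Int) (g : Int → List β)
    (hg : ∀ r, ¬ (a - 1 ≤ r ∧ r ≤ a + 1) → g r = []) :
    (PySem.List.pyRange 0 H 1).flatMap g =
      (if 0 ≤ a - 1 ∧ a - 1 < H then g (a - 1) else []) ++
      (if 0 ≤ a ∧ a < H then g a else []) ++
      (if 0 ≤ a + 1 ∧ a + 1 < H then g (a + 1) else []) := by
  rw [flatMap_eq_flatMap_filter _ (fun r => a - 1 ≤ r ∧ r ≤ a + 1) g (fun r _ h => hg r h),
    filter_pyRange_window, range3]
  simp only [List.flatMap_append, flatMap_ite_singleton]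

-- one cell of the grid, with the row/col already at distance ≤ 1 from cord
lemma cell_eq (x y : Int) (cord : Int × Int) (vis : List (Int × Int)) (board : List (List String))
    (hx : (x - cord.1).natAbs ≤ 1) (hy : (y - cord.2).natAbs ≤ 1) :
    (if ((x, y) ∉ vis ∧ pv_check_cord_in_board (x, y) board = true ∧ (x, y) ≠ cord) then [(x, y)] else ([] : List (Int × Int))) =
    (if 0 ≤ x ∧ x < (board.length : Int) then
       if 0 ≤ y ∧ y < ((board.headD []).length : Int) then
         if max (x - cord.1).natAbs (y - cord.2).natAbs = 1 ∧ (x, y) ∉ vis then [(x, y)] else [] else [] else []) := by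
  have hne : ((x, y) ≠ cord) ↔ (max (x - cord.1).natAbs (y - cord.2).natAbs = 1) := by
    rcases cord with ⟨a, b⟩
    simp only [ne_eq, Prod.mk.injEq, not_and] at *
    omega
  simp only [check_iff, hne]
  split_ifs <;> first | rfl | tauto

-- ===== VERDICT (by name: the statement is the Claim_ definition above) =====
theorem find_neighbors_cord_spec : Claim_equal_find_neighbors_cord := by
  intro cord vis board remain_word _ _
  unfold Spec_find_neighbors_cord
  by_cases h : remain_word = ""
  · simp [find_neighbors_cord, find_neighbors_cord_alt, h]
  · simp only [find_neighbors_cord, find_neighbors_cord_alt, if_neg h]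
    rw [foldl_app_ite]
    -- B: collapse the outer full-range scan to the three candidate rows
    rw [flatMap_range_window (board.length : Int) cord.1 _
      (fun r hr => List.flatMap_eq_nil_iff.2 (fun c _ => if_neg (by rintro ⟨hm, -⟩; omega)))]
    -- B: collapse each inner full-range scan to the three candidate columns
    rw [flatMap_range_window ((board.headD []).length : Int) cord.2
        (fun c => if max ((cord.1 - 1) - cord.1).natAbs (c - cord.2).natAbs = 1 ∧ (cord.1 - 1, c) ∉ vis then [(cord.1 - 1, c)] else [])
        (fun c hc => if_neg (by rintro ⟨hm, -⟩; omega)),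
      flatMap_range_window ((board.headD []).length : Int) cord.2
        (fun c => if max (cord.1 - cord.1).natAbs (c - cord.2).natAbs = 1 ∧ (cord.1, c) ∉ vis then [(cord.1, c)] else [])
        (fun c hc => if_neg (by rintro ⟨hm, -⟩; omega)),
      flatMap_range_window ((board.headD []).length : Int) cord.2
        (fun c => if max ((cord.1 + 1) - cord.1).natAbs (c - cord.2).natAbs = 1 ∧ (cord.1 + 1, c) ∉ vis then [(cord.1 + 1, c)] else [])
        (fun c hc => if_neg (by rintro ⟨hm, -⟩; omega))]
    simp only [ite_append_distrib]
    -- A: the 9-move product, normalised to the same nested guarded cells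
    simp only [List.flatMap_cons, List.flatMap_nil, List.append_nil, List.nil_append]
    simp only [← sub_eq_add_neg, add_zero]
    rw [cell_eq (cord.1 - 1) (cord.2 - 1) cord vis board (by omega) (by omega),
      cell_eq (cord.1 - 1) cord.2 cord vis board (by omega) (by omega),
      cell_eq (cord.1 - 1) (cord.2 + 1) cord vis board (by omega) (by omega),
      cell_eq cord.1 (cord.2 - 1) cord vis board (by omega) (by omega),
      cell_eq cord.1 cord.2 cord vis board (by omega) (by omega),
      cell_eq cord.1 (cord.2 + 1) cord vis board (by omega) (by omega),
      cell_eq (cord.1 + 1) (cord.2 - 1) cord vis board (by omega) (by omega),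
      cell_eq (cord.1 + 1) cord.2 cord vis board (by omega) (by omega),
      cell_eq (cord.1 + 1) (cord.2 + 1) cord vis board (by omega) (by omega)]
    simp only [List.append_assoc]
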